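-- pv_equiv track=rewrite | github.com/msk4862/DS-Algo | Practice/OnlineJudge/TEX.py | TEXT_conv
-- ===== SOURCE A (Python) =====
-- def TEXT_conv(text):
--     q = '"'
--     new_text = ''
--     check = 1
--     for x in text:
--         if x is q:
--             if check % 2 != 0:
--                 new_text += '``'
--             else:
--                 new_text += "''"
--             check+=1
--         else:
--             new_text += x
--     return new_text
-- ===== SOURCE B (Python) =====
-- def TEXT_conv(text):
--     parts = text.split('"')
--     new_text = parts[0]
--     for i in range(1, len(parts)):
--         new_text += '``' if i % 2 != 0 else "''"
--         new_text += parts[i]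
--     return new_text
-- ===== Notes on version B (the rewrite author's own statement) =====
-- stated objective: simpler
-- what changed: Replaces the character-by-character scan holding a quote-parity counter by splitting the text on the quote character and reassembling the segments with alternating TeX open/close separators chosen by segment-index parity.
import Mathlib
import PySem

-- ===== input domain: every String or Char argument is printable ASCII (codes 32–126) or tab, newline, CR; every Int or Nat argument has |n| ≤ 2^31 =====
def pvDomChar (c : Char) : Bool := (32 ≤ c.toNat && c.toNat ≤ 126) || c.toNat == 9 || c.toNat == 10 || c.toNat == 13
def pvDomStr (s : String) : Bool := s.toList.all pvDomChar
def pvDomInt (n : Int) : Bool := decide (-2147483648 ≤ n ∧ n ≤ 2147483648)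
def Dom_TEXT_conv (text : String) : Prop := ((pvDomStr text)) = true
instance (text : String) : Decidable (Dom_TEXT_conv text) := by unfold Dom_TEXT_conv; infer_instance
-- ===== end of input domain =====

-- B replaces A's per-character parity-toggle scan by split('"') + reassembly with
-- alternating separators (simpler decomposition; same asymptotic cost).

-- ===== PORT A =====
-- literal port of A's character loop; Python's `x is q` holds exactly for the
-- quote character under CPython's single-character interning, ported as equality
def TEXT_conv (text : String) : String :=
  let q := '"'
  let r := text.toList.foldl
      (fun (st : List Char × Int) x =>
        if x = q then
          (st.1 ++ (if st.2 % 2 ≠ 0 then ['`', '`'] else ['\'', '\'']), st.2 + 1)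
        else (st.1 ++ [x], st.2))
      ([], 1)
  String.ofList r.1

-- ===== PORT B =====
def TEXT_conv_alt (text : String) : String :=
  let parts := PySem.Chars.splitOn text.toList ['"']
  let res := (PySem.List.pyRange 1 (parts.length : Int) 1).foldl
      (fun res i =>
        (res ++ (if i % 2 ≠ 0 then ['`', '`'] else ['\'', '\''])) ++
          (PySem.List.pyGet? parts i).getD [])
      ((PySem.List.pyGet? parts 0).getD [])
  String.ofList res

-- ===== PRECONDITION & SPEC =====
def Spec_TEXT_conv (text : String) (out : String) : Prop := out = TEXT_conv_alt text
instance (text : String) (out : String) : Decidable (Spec_TEXT_conv text out) := by unfold Spec_TEXT_conv; infer_instance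

-- ===== CLAIM (what is proved, stated in full; the proofs are below) =====
def Claim_equal_TEXT_conv : Prop := ∀ (text : String), Dom_TEXT_conv text → Spec_TEXT_conv text (TEXT_conv text)

-- ===== LEMMAS AND PROOFS =====

/-- the separator the quote counter `p` chooses -/
def pvSep (p : Int) : List Char := if p % 2 ≠ 0 then ['`', '`'] else ['\'', '\'']

/-- A's scan, written as structural recursion -/
def pvScan : List Char → Int → List Char
  | [], _ => []
  | c :: cs, p => if c = '"' then pvSep p ++ pvScan cs (p + 1) else c :: pvScan cs p

/-- splitting on '"' with an accumulator for the current segment (reversed) -/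
def pvSplit : List Char → List Char → List (List Char)
  | [], cur => [cur.reverse]
  | c :: cs, cur => if c = '"' then cur.reverse :: pvSplit cs [] else pvSplit cs (c :: cur)

/-- reassembly of the segments after the first, counter starting at `p` -/
def pvGlue : Int → List (List Char) → List Char
  | _, [] => []
  | p, x :: rest => pvSep p ++ x ++ pvGlue (p + 1) rest

theorem pvSplit_ne_nil (cs cur : List Char) : pvSplit cs cur ≠ [] := by
  induction cs generalizing cur with
  | nil => simp [pvSplit]
  | cons c cs ih => by_cases h : c = '"' <;> simp [pvSplit, h, ih]

theorem pvScan_eq_split (cs : List Char) (cur : List Char) (p : Int) :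
    cur.reverse ++ pvScan cs p =
      (pvSplit cs cur).headI ++ pvGlue p (pvSplit cs cur).tail := by
  induction cs generalizing cur p with
  | nil => simp [pvScan, pvSplit, pvGlue]
  | cons c cs ih =>
    by_cases h : c = '"'
    · obtain ⟨y, rest, hy⟩ : ∃ y rest, pvSplit cs ([] : List Char) = y :: rest := by
        cases hsp : pvSplit cs ([] : List Char) with
        | nil => exact absurd hsp (pvSplit_ne_nil cs [])
        | cons y rest => exact ⟨y, rest, rfl⟩
      have := ih ([] : List Char) (p + 1)
      simp [hy] at this
      simp [pvScan, pvSplit, h, hy, pvGlue, this]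
    · have := ih (c :: cur) p
      simpa [pvScan, pvSplit, h] using this

theorem pvFoldA (cs : List Char) (acc : List Char) (p : Int) :
    (cs.foldl
      (fun (st : List Char × Int) x =>
        if x = '"' then
          (st.1 ++ (if st.2 % 2 ≠ 0 then ['`', '`'] else ['\'', '\'']), st.2 + 1)
        else (st.1 ++ [x], st.2)) (acc, p)).1 = acc ++ pvScan cs p := by
  induction cs generalizing acc p with
  | nil => simp [pvScan]
  | cons c cs ih =>
    rw [List.foldl_cons]
    by_cases h : c = '"'
    · simp only [if_pos h]
      rw [ih]
      simp [pvScan, h, pvSep]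
    · simp only [if_neg h]
      rw [ih]
      simp [pvScan, h]

theorem pvGo_eq (fuel : Nat) (l cur : List Char) (acc : List (List Char))
    (hf : l.length < fuel) :
    PySem.Chars.splitOn.go ['"'] fuel l cur acc = acc.reverse ++ pvSplit l cur := by
  induction fuel generalizing l cur acc with
  | zero => omega
  | succ f ih =>
    cases l with
    | nil => simp [PySem.Chars.splitOn.go, pvSplit]
    | cons c rest =>
      by_cases h : c = '"'
      · have hp : (['"'] : List Char).isPrefixOf (c :: rest) = true := by
          simp [List.isPrefixOf, h]
        rw [PySem.Chars.splitOn.go]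
        simp only [hp, if_true, List.length_cons, List.length_nil, List.drop_succ_cons,
          List.drop_zero]
        rw [ih rest [] (cur.reverse :: acc) (by simpa using Nat.lt_of_succ_lt_succ hf)]
        simp [pvSplit, h]
      · have hp : (['"'] : List Char).isPrefixOf (c :: rest) = false := by
          simp [List.isPrefixOf]
          exact fun hc => absurd hc.symm h
        rw [PySem.Chars.splitOn.go]
        simp only [hp, Bool.false_eq_true, if_false]
        rw [ih rest (c :: cur) acc (by simpa using Nat.lt_of_succ_lt_succ hf)]
        simp [pvSplit, h]

theorem pvSplitOn_eq (cs : List Char) :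
    PySem.Chars.splitOn cs ['"'] = pvSplit cs [] := by
  unfold PySem.Chars.splitOn
  simpa using pvGo_eq (cs.length + 1) cs [] [] (by omega)

theorem pvFoldB (parts : List (List Char)) (l : List (List Char)) (j : Int) (r0 : List Char)
    (h0 : 0 ≤ j) (hd : parts.drop j.toNat = l) :
    (PySem.List.pyRange j (parts.length : Int) 1).foldl
      (fun res i =>
        (res ++ (if i % 2 ≠ 0 then ['`', '`'] else ['\'', '\''])) ++
          (PySem.List.pyGet? parts i).getD []) r0 = r0 ++ pvGlue j l := by
  induction l generalizing j r0 with
  | nil =>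
    have hlen : (parts.length : Int) ≤ j := by
      have := List.drop_eq_nil_iff.mp hd
      omega
    have : PySem.List.pyRange j (parts.length : Int) 1 = [] := by
      simp [PySem.List.pyRange]
      omega
    simp [this, pvGlue]
  | cons x rest ih =>
    have hjlt : j < (parts.length : Int) := by
      by_contra hcon
      have : parts.length ≤ j.toNat := by omega
      simp [List.drop_eq_nil_iff.mpr this] at hd
    rw [PySem.List.pyRange_one_cons hjlt]
    have hget : PySem.List.pyGet? parts j = some x := by
      have hx : parts[j.toNat]? = some x := by
        have h : (List.drop j.toNat parts)[0]? = parts[j.toNat + 0]? := List.getElem?_drop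
        rw [hd] at h
        simpa using h.symm
      have h1 : j = ((j.toNat : Nat) : Int) := by omega
      rw [h1, PySem.List.pyGet?_natCast]
      exact hx
    have hd' : parts.drop (j + 1).toNat = rest := by
      have h1 : (j + 1).toNat = j.toNat + 1 := by omega
      rw [h1, ← List.drop_drop]
      simp [hd]
    simp only [List.foldl_cons, hget, Option.getD_some]
    rw [ih (j + 1) _ (by omega) hd']
    simp [pvGlue, pvSep]

-- ===== VERDICT (by name: the statement is the Claim_ definition above) =====
theorem TEXT_conv_spec : Claim_equal_TEXT_conv := by
  intro text _
  unfold Spec_TEXT_conv TEXT_conv TEXT_conv_alt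
  rw [pvSplitOn_eq]
  obtain ⟨y, rest, hy⟩ : ∃ y rest, pvSplit text.toList [] = y :: rest := by
    cases hsp : pvSplit text.toList ([] : List Char) with
    | nil => exact absurd hsp (pvSplit_ne_nil _ [])
    | cons y rest => exact ⟨y, rest, rfl⟩
  have hA := pvFoldA text.toList [] 1
  have hS := pvScan_eq_split text.toList [] 1
  have hB := pvFoldB (pvSplit text.toList []) rest 1 y (by omega)
    (by simp [hy])
  have hget0 : PySem.List.pyGet? (pvSplit text.toList []) 0 = some y := by
    rw [show (0 : Int) = ((0 : Nat) : Int) from rfl, PySem.List.pyGet?_natCast, hy]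
    rfl
  simp only [hy, List.reverse_nil, List.nil_append, List.headI_cons, List.tail_cons] at hS
  simp only [hA, hget0, Option.getD_some, hB, List.nil_append, hS]
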